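-- pv_equiv track=rewrite | github.com/Drgntr/mapleguard | backend/services/character_price_predictor.py | _level_bracket
-- ===== SOURCE A (Python) =====
-- def _level_bracket(level: int) -> str:
--     thresholds = [65, 120, 140, 160, 200, 220, 230, 240]
--     current = "0"
--     for t in thresholds:
--         if level >= t:
--             current = str(t)
--         else:
--             break
--     return current
-- ===== SOURCE B (Python) =====
-- from bisect import bisect_right
--
-- def _level_bracket(level: int) -> str:
--     thresholds = [65, 120, 140, 160, 200, 220, 230, 240]
--     i = bisect_right(thresholds, level)
--     return str(thresholds[i - 1]) if i > 0 else "0"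
-- ===== Notes on version B (the rewrite author's own statement) =====
-- stated objective: idiomatic
-- what changed: Replaces the break-early linear scan over the thresholds with a bisect_right binary search on the sorted constant list, returning the threshold left of the insertion point.
import Mathlib
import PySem

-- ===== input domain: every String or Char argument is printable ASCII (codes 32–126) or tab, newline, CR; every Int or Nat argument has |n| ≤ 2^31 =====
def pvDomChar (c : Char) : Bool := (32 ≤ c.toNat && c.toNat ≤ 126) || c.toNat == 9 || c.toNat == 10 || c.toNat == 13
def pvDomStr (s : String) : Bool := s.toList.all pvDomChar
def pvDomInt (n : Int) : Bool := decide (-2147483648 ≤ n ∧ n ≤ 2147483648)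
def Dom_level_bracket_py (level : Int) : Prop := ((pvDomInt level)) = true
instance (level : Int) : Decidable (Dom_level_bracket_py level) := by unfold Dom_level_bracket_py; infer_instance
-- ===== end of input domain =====

-- B replaces A's break-early linear scan with a bisect_right binary search over the sorted constant thresholds (idiomatic); same return value everywhere.

-- ===== PORT A =====
-- A's for-loop with break: recursion over the threshold list carrying `current`.
def pvLoopA (level : Int) : List Int → String → String
  | [], cur => cur
  | t :: ts, cur => if level ≥ t then pvLoopA level ts (PySem.Int.toStr t) else cur

def level_bracket_py (level : Int) : String :=
  pvLoopA level [65, 120, 140, 160, 200, 220, 230, 240] "0"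

-- ===== PORT B =====
-- bisect.bisect_right transliterated: binary search on indices lo..hi.
def pvBisectRight (a : List Int) (x : Int) (lo hi : Nat) : Nat :=
  if h : lo < hi then
    let mid := (lo + hi) / 2
    if x < a.getD mid 0 then pvBisectRight a x lo mid
    else pvBisectRight a x (mid + 1) hi
  else lo
termination_by hi - lo
decreasing_by all_goals omega

def level_bracket_py_alt (level : Int) : String :=
  let thresholds : List Int := [65, 120, 140, 160, 200, 220, 230, 240]
  let i := pvBisectRight thresholds level 0 thresholds.length
  if i > 0 then PySem.Int.toStr (thresholds.getD (i - 1) 0) else "0"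

-- ===== PRECONDITION & SPEC =====
def Spec_level_bracket_py (level : Int) (out : String) : Prop := out = level_bracket_py_alt level
instance (level : Int) (out : String) : Decidable (Spec_level_bracket_py level out) := by unfold Spec_level_bracket_py; infer_instance

-- ===== CLAIM (what is proved, stated in full; the proofs are below) =====
def Claim_equal_level_bracket_py : Prop := ∀ (level : Int), Dom_level_bracket_py level → Spec_level_bracket_py level (level_bracket_py level)

-- ===== LEMMAS AND PROOFS =====

-- ===== VERDICT (by name: the statement is the Claim_ definition above) =====
set_option maxRecDepth 4000 in
theorem level_bracket_py_spec : Claim_equal_level_bracket_py := by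
  intro level _
  unfold Spec_level_bracket_py level_bracket_py level_bracket_py_alt
  by_cases h0 : level < 65
  · have f0 : level < 65 := by omega
    have g0 : ¬ (65:Int) ≤ level := by omega
    have f1 : level < 120 := by omega
    have g1 : ¬ (120:Int) ≤ level := by omega
    have f2 : level < 140 := by omega
    have g2 : ¬ (140:Int) ≤ level := by omega
    have f3 : level < 160 := by omega
    have g3 : ¬ (160:Int) ≤ level := by omega
    have f4 : level < 200 := by omega
    have g4 : ¬ (200:Int) ≤ level := by omega
    have f5 : level < 220 := by omega
    have g5 : ¬ (220:Int) ≤ level := by omega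
    have f6 : level < 230 := by omega
    have g6 : ¬ (230:Int) ≤ level := by omega
    have f7 : level < 240 := by omega
    have g7 : ¬ (240:Int) ≤ level := by omega
    simp [pvLoopA, pvBisectRight, ge_iff_le, f0,g0,f1,g1,f2,g2,f3,g3,f4,g4,f5,g5,f6,g6,f7,g7]
  ·
    by_cases h1 : level < 120
    · have f0 : (65:Int) ≤ level := by omega
      have g0 : ¬ level < 65 := by omega
      have f1 : level < 120 := by omega
      have g1 : ¬ (120:Int) ≤ level := by omega
      have f2 : level < 140 := by omega
      have g2 : ¬ (140:Int) ≤ level := by omega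
      have f3 : level < 160 := by omega
      have g3 : ¬ (160:Int) ≤ level := by omega
      have f4 : level < 200 := by omega
      have g4 : ¬ (200:Int) ≤ level := by omega
      have f5 : level < 220 := by omega
      have g5 : ¬ (220:Int) ≤ level := by omega
      have f6 : level < 230 := by omega
      have g6 : ¬ (230:Int) ≤ level := by omega
      have f7 : level < 240 := by omega
      have g7 : ¬ (240:Int) ≤ level := by omega
      simp [pvLoopA, pvBisectRight, ge_iff_le, f0,g0,f1,g1,f2,g2,f3,g3,f4,g4,f5,g5,f6,g6,f7,g7]
    ·
      by_cases h2 : level < 140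
      · have f0 : (65:Int) ≤ level := by omega
        have g0 : ¬ level < 65 := by omega
        have f1 : (120:Int) ≤ level := by omega
        have g1 : ¬ level < 120 := by omega
        have f2 : level < 140 := by omega
        have g2 : ¬ (140:Int) ≤ level := by omega
        have f3 : level < 160 := by omega
        have g3 : ¬ (160:Int) ≤ level := by omega
        have f4 : level < 200 := by omega
        have g4 : ¬ (200:Int) ≤ level := by omega
        have f5 : level < 220 := by omega
        have g5 : ¬ (220:Int) ≤ level := by omega
        have f6 : level < 230 := by omega
        have g6 : ¬ (230:Int) ≤ level := by omega
        have f7 : level < 240 := by omega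
        have g7 : ¬ (240:Int) ≤ level := by omega
        simp [pvLoopA, pvBisectRight, ge_iff_le, f0,g0,f1,g1,f2,g2,f3,g3,f4,g4,f5,g5,f6,g6,f7,g7]
      ·
        by_cases h3 : level < 160
        · have f0 : (65:Int) ≤ level := by omega
          have g0 : ¬ level < 65 := by omega
          have f1 : (120:Int) ≤ level := by omega
          have g1 : ¬ level < 120 := by omega
          have f2 : (140:Int) ≤ level := by omega
          have g2 : ¬ level < 140 := by omega
          have f3 : level < 160 := by omega
          have g3 : ¬ (160:Int) ≤ level := by omega
          have f4 : level < 200 := by omega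
          have g4 : ¬ (200:Int) ≤ level := by omega
          have f5 : level < 220 := by omega
          have g5 : ¬ (220:Int) ≤ level := by omega
          have f6 : level < 230 := by omega
          have g6 : ¬ (230:Int) ≤ level := by omega
          have f7 : level < 240 := by omega
          have g7 : ¬ (240:Int) ≤ level := by omega
          simp [pvLoopA, pvBisectRight, ge_iff_le, f0,g0,f1,g1,f2,g2,f3,g3,f4,g4,f5,g5,f6,g6,f7,g7]
        ·
          by_cases h4 : level < 200
          · have f0 : (65:Int) ≤ level := by omega
            have g0 : ¬ level < 65 := by omega
            have f1 : (120:Int) ≤ level := by omega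
            have g1 : ¬ level < 120 := by omega
            have f2 : (140:Int) ≤ level := by omega
            have g2 : ¬ level < 140 := by omega
            have f3 : (160:Int) ≤ level := by omega
            have g3 : ¬ level < 160 := by omega
            have f4 : level < 200 := by omega
            have g4 : ¬ (200:Int) ≤ level := by omega
            have f5 : level < 220 := by omega
            have g5 : ¬ (220:Int) ≤ level := by omega
            have f6 : level < 230 := by omega
            have g6 : ¬ (230:Int) ≤ level := by omega
            have f7 : level < 240 := by omega
            have g7 : ¬ (240:Int) ≤ level := by omega
            simp [pvLoopA, pvBisectRight, ge_iff_le, f0,g0,f1,g1,f2,g2,f3,g3,f4,g4,f5,g5,f6,g6,f7,g7]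
          ·
            by_cases h5 : level < 220
            · have f0 : (65:Int) ≤ level := by omega
              have g0 : ¬ level < 65 := by omega
              have f1 : (120:Int) ≤ level := by omega
              have g1 : ¬ level < 120 := by omega
              have f2 : (140:Int) ≤ level := by omega
              have g2 : ¬ level < 140 := by omega
              have f3 : (160:Int) ≤ level := by omega
              have g3 : ¬ level < 160 := by omega
              have f4 : (200:Int) ≤ level := by omega
              have g4 : ¬ level < 200 := by omega
              have f5 : level < 220 := by omega
              have g5 : ¬ (220:Int) ≤ level := by omega
              have f6 : level < 230 := by omega
              have g6 : ¬ (230:Int) ≤ level := by omega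
              have f7 : level < 240 := by omega
              have g7 : ¬ (240:Int) ≤ level := by omega
              simp [pvLoopA, pvBisectRight, ge_iff_le, f0,g0,f1,g1,f2,g2,f3,g3,f4,g4,f5,g5,f6,g6,f7,g7]
            ·
              by_cases h6 : level < 230
              · have f0 : (65:Int) ≤ level := by omega
                have g0 : ¬ level < 65 := by omega
                have f1 : (120:Int) ≤ level := by omega
                have g1 : ¬ level < 120 := by omega
                have f2 : (140:Int) ≤ level := by omega
                have g2 : ¬ level < 140 := by omega
                have f3 : (160:Int) ≤ level := by omega
                have g3 : ¬ level < 160 := by omega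
                have f4 : (200:Int) ≤ level := by omega
                have g4 : ¬ level < 200 := by omega
                have f5 : (220:Int) ≤ level := by omega
                have g5 : ¬ level < 220 := by omega
                have f6 : level < 230 := by omega
                have g6 : ¬ (230:Int) ≤ level := by omega
                have f7 : level < 240 := by omega
                have g7 : ¬ (240:Int) ≤ level := by omega
                simp [pvLoopA, pvBisectRight, ge_iff_le, f0,g0,f1,g1,f2,g2,f3,g3,f4,g4,f5,g5,f6,g6,f7,g7]
              ·
                by_cases h7 : level < 240
                · have f0 : (65:Int) ≤ level := by omega
                  have g0 : ¬ level < 65 := by omega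
                  have f1 : (120:Int) ≤ level := by omega
                  have g1 : ¬ level < 120 := by omega
                  have f2 : (140:Int) ≤ level := by omega
                  have g2 : ¬ level < 140 := by omega
                  have f3 : (160:Int) ≤ level := by omega
                  have g3 : ¬ level < 160 := by omega
                  have f4 : (200:Int) ≤ level := by omega
                  have g4 : ¬ level < 200 := by omega
                  have f5 : (220:Int) ≤ level := by omega
                  have g5 : ¬ level < 220 := by omega
                  have f6 : (230:Int) ≤ level := by omega
                  have g6 : ¬ level < 230 := by omega
                  have f7 : level < 240 := by omega
                  have g7 : ¬ (240:Int) ≤ level := by omega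
                  simp [pvLoopA, pvBisectRight, ge_iff_le, f0,g0,f1,g1,f2,g2,f3,g3,f4,g4,f5,g5,f6,g6,f7,g7]
                ·
                  have f0 : (65:Int) ≤ level := by omega
                  have g0 : ¬ level < 65 := by omega
                  have f1 : (120:Int) ≤ level := by omega
                  have g1 : ¬ level < 120 := by omega
                  have f2 : (140:Int) ≤ level := by omega
                  have g2 : ¬ level < 140 := by omega
                  have f3 : (160:Int) ≤ level := by omega
                  have g3 : ¬ level < 160 := by omega
                  have f4 : (200:Int) ≤ level := by omega
                  have g4 : ¬ level < 200 := by omega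
                  have f5 : (220:Int) ≤ level := by omega
                  have g5 : ¬ level < 220 := by omega
                  have f6 : (230:Int) ≤ level := by omega
                  have g6 : ¬ level < 230 := by omega
                  have f7 : (240:Int) ≤ level := by omega
                  have g7 : ¬ level < 240 := by omega
                  simp [pvLoopA, pvBisectRight, ge_iff_le, f0,g0,f1,g1,f2,g2,f3,g3,f4,g4,f5,g5,f6,g6,f7,g7]
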